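-- pv_equiv track=rewrite | github.com/yamgent/advent-of-code-2020 | 20/2.py | rotate_flip_pixels
-- ===== SOURCE A (Python) =====
-- ORI_NORM = 0
--
-- ORI_90 = 1
--
-- ORI_180 = 2
--
-- ORI_270 = 3
--
-- ORI_FLIP = 4     # flip on x axis
--
-- ORI_FLIP_90 = 5
--
-- ORI_FLIP_180 = 6
--
-- ORI_FLIP_270 = 7
--
-- def rotate_flip_pixels(pixels, orientation):
--     H = len(pixels) if orientation in [ORI_NORM, ORI_180, ORI_FLIP, ORI_FLIP_180] else len(pixels[0])
--     W = len(pixels[0]) if H != len(pixels[0]) else len(pixels)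
--
--     res = []
--     for y in range(H):
--         row = []
--         for x in range(W):
--             orig_x = x
--             orig_y = y
--
--             if orientation == ORI_90 or orientation == ORI_FLIP_270:
--                 orig_x = y
--                 orig_y = len(pixels) - x - 1
--             elif orientation == ORI_180 or orientation == ORI_FLIP_180:
--                 orig_x = len(pixels[0]) - x - 1
--                 orig_y = len(pixels) - y - 1
--             elif orientation == ORI_270 or orientation == ORI_FLIP_90:
--                 orig_x = len(pixels[0]) - y - 1
--                 orig_y = x
--
--             row.append(pixels[orig_y][orig_x])
--
--         res.append(row)
--
--     if orientation in [ORI_FLIP, ORI_FLIP_90, ORI_FLIP_180, ORI_FLIP_270]: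
--         res = list(reversed(res))
--     return res
-- ===== SOURCE B (Python) =====
-- def rotate_flip_pixels(pixels, orientation):
--     # dispatch each orientation to a base rotation, then flip vertically for >= 4
--     base = (0, 1, 2, 3, 0, 3, 2, 1)[orientation]
--     if base == 0:
--         res = [list(r) for r in pixels]
--     elif base == 1:
--         res = [list(r) for r in zip(*reversed(pixels))]
--     elif base == 2:
--         res = [r[::-1] for r in reversed(pixels)]
--     else:
--         res = [list(r) for r in reversed(list(zip(*pixels)))]
--     if orientation >= 4:
--         res = list(reversed(res))
--     return res
-- ===== Notes on version B (the rewrite author's own statement) =====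
-- stated objective: idiomatic
-- what changed: A computes each output cell with per-orientation index arithmetic inside a nested range loop; B dispatches the orientation to one of four whole-grid rotation primitives built from transpose (zip) and reversal, then applies a single vertical flip for orientations 4-7.
-- outside the precondition, e.g. on rotate_flip_pixels([['a'], ['b', 'c']], 0): A returns [['a'], ['b']], B returns [['a'], ['b', 'c']]; on rotate_flip_pixels([['a']], 8): A returns [['a']], B raises IndexError
import Mathlib
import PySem

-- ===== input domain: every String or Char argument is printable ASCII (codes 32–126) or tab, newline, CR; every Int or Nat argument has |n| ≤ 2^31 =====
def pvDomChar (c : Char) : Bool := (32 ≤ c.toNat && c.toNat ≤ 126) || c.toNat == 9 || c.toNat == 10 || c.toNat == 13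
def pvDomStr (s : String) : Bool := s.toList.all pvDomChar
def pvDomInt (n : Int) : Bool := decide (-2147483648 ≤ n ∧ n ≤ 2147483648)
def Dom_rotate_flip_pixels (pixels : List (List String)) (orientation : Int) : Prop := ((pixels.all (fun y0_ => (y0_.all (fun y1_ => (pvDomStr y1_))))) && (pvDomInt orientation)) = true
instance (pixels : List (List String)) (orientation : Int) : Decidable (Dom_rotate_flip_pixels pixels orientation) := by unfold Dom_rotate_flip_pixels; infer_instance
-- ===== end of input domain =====

-- B replaces A's per-cell index arithmetic by a dispatch to whole-grid rotation
-- primitives (transpose/reverse) plus a final vertical flip (objective: idiomatic).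

-- ===== PORT A =====
-- literal transliteration of A: per-cell index arithmetic over ranges
def rotate_flip_pixels (pixels : List (List String)) (orientation : Int) : List (List String) :=
  let row0 := pixels.headD []   -- pixels[0]; Pre_ excludes empty pixels, where Python raises
  let H : Int := if orientation = 0 ∨ orientation = 2 ∨ orientation = 4 ∨ orientation = 6
                 then (pixels.length : Int) else (row0.length : Int)
  let W : Int := if H ≠ (row0.length : Int) then (row0.length : Int) else (pixels.length : Int)
  let res := (PySem.List.pyRange 0 H 1).map (fun y =>
    (PySem.List.pyRange 0 W 1).map (fun x =>
      let p : Int × Int :=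
        if orientation = 1 ∨ orientation = 7 then (y, (pixels.length : Int) - x - 1)
        else if orientation = 2 ∨ orientation = 6 then
          ((row0.length : Int) - x - 1, (pixels.length : Int) - y - 1)
        else if orientation = 3 ∨ orientation = 5 then ((row0.length : Int) - y - 1, x)
        else (x, y)
      -- pixels[orig_y][orig_x]; in range under Pre_ (rectangular, 0 ≤ orientation < 8)
      PySem.List.pyGetD (PySem.List.pyGetD pixels p.2 []) p.1 ""))
  if orientation = 4 ∨ orientation = 5 ∨ orientation = 6 ∨ orientation = 7 then res.reverse else res

-- ===== PORT B =====
-- zip(*xss): Python's zip over the rows, stopping at the shortest row.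
-- Fuel = length of the first row (an upper bound on the number of emitted tuples),
-- so the recursion is structural and kernel-evaluable.
def pyZipAux : Nat → List (List String) → List (List String)
  | 0, _ => []
  | fuel + 1, xss =>
    if xss.isEmpty || xss.any (·.isEmpty) then []
    else (xss.map (fun r => r.headD "")) :: pyZipAux fuel (xss.map (fun r => r.tail))

def pyZip (xss : List (List String)) : List (List String) :=
  pyZipAux (xss.headD []).length xss

def rotate_flip_pixels_alt (pixels : List (List String)) (orientation : Int) : List (List String) :=
  -- base = (0,1,2,3,0,3,2,1)[orientation]; in range under Pre_ (0 ≤ orientation < 8)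
  let base := PySem.List.pyGetD [(0:Int),1,2,3,0,3,2,1] orientation 0
  let res :=
    if base = 0 then pixels.map (fun r => r)
    else if base = 1 then pyZip pixels.reverse
    else if base = 2 then pixels.reverse.map (fun r => r.reverse)
    else (pyZip pixels).reverse
  if 4 ≤ orientation then res.reverse else res

-- ===== PRECONDITION & SPEC =====
-- Pre_ excludes: the empty grid (A raises IndexError on pixels[0]); orientations outside
-- 0..7 (A's identity fallthrough there is accidental; B raises); and ragged grids on which
-- A's truncated output is an accident of its index arithmetic — for even orientations all
-- rows must equal the first row's length, for odd orientations rows may be longer than the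
-- first row (there A and B agree: both read exactly the first len(pixels[0]) columns).
def Pre_rotate_flip_pixels (pixels : List (List String)) (orientation : Int) : Prop :=
  0 ≤ orientation ∧ orientation < 8 ∧ pixels ≠ [] ∧
    (if orientation % 2 = 0
     then (pixels.all (fun r => r.length == (pixels.headD []).length)) = true
     else (pixels.all (fun r => decide ((pixels.headD []).length ≤ r.length))) = true)
instance (pixels : List (List String)) (orientation : Int) : Decidable (Pre_rotate_flip_pixels pixels orientation) := by unfold Pre_rotate_flip_pixels; infer_instance

def pvWitness_rotate_flip_pixels : List (List String) × Int := ([["a", "b"], ["c", "d"], ["e", "f"]], 5)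

def Spec_rotate_flip_pixels (pixels : List (List String)) (orientation : Int) (out : List (List String)) : Prop := out = rotate_flip_pixels_alt pixels orientation
instance (pixels : List (List String)) (orientation : Int) (out : List (List String)) : Decidable (Spec_rotate_flip_pixels pixels orientation out) := by unfold Spec_rotate_flip_pixels; infer_instance

-- ===== CLAIM (what is proved, stated in full; the proofs are below) =====
def Claim_equal_rotate_flip_pixels : Prop := ∀ (pixels : List (List String)) (orientation : Int), Dom_rotate_flip_pixels pixels orientation → Pre_rotate_flip_pixels pixels orientation → Spec_rotate_flip_pixels pixels orientation (rotate_flip_pixels pixels orientation)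

-- ===== LEMMAS AND PROOFS =====





lemma headD_mem (l : List (List String)) (h : l ≠ []) : l.headD [] ∈ l := by
  cases l with
  | nil => exact absurd rfl h
  | cons r t => simp

lemma pyZipAux_eq (C : Nat) : ∀ (fuel : Nat) (xss : List (List String)), xss ≠ [] →
    (∃ r ∈ xss, r.length = C) → (∀ r ∈ xss, C ≤ r.length) → C ≤ fuel →
    pyZipAux fuel xss = (List.range C).map (fun j => xss.map (fun r => r.getD j "")) := by
  induction C with
  | zero =>
    intro fuel xss hne hmin hge hfuel
    obtain ⟨r0, hr0, hlen0⟩ := hmin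
    cases fuel with
    | zero => simp [pyZipAux]
    | succ f =>
      rw [pyZipAux]
      rw [if_pos]
      · simp
      · refine Bool.or_eq_true _ _ |>.mpr (Or.inr ?_)
        exact List.any_eq_true.mpr ⟨r0, hr0, by simp [List.length_eq_zero_iff.mp hlen0]⟩
  | succ C ih =>
    intro fuel xss hne hmin hge hfuel
    have hnz : ∀ r ∈ xss, r ≠ [] := by
      intro r hr h; have := hge r hr; simp [h] at this
    cases fuel with
    | zero => omega
    | succ f =>
      rw [pyZipAux]
      have hcond : (xss.isEmpty || xss.any (·.isEmpty)) = false := by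
        simp only [Bool.or_eq_false_iff, List.any_eq_false]
        exact ⟨by simpa [List.isEmpty_iff] using hne,
          fun r hr => by simpa [List.isEmpty_iff] using hnz r hr⟩
      rw [if_neg (by simp [hcond])]
      obtain ⟨r0, hr0, hlen0⟩ := hmin
      rw [ih f (xss.map (fun r => r.tail))
        (by simpa using hne)
        (⟨r0.tail, List.mem_map_of_mem hr0, by simp [List.length_tail, hlen0]⟩)
        (by intro r hr; simp at hr; obtain ⟨s, hs, rfl⟩ := hr
            have := hge s hs; simp [List.length_tail]; omega)
        (by omega)]
      rw [List.range_succ_eq_map]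
      simp only [List.map_cons, List.map_map]
      congr 1
      · apply List.map_congr_left
        intro r hr
        cases r with
        | nil => exact absurd rfl (hnz _ hr)
        | cons a t => rfl
      · apply List.map_congr_left
        intro j _
        apply List.map_congr_left
        intro r hr
        cases r with
        | nil => exact absurd rfl (hnz _ hr)
        | cons a t => rfl

lemma pyZip_eq (C : Nat) (xss : List (List String)) (hne : xss ≠ [])
    (hmin : ∃ r ∈ xss, r.length = C) (hge : ∀ r ∈ xss, C ≤ r.length) :
    pyZip xss = (List.range C).map (fun j => xss.map (fun r => r.getD j "")) := by
  rw [pyZip]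
  exact pyZipAux_eq C _ xss hne hmin hge (hge _ (headD_mem xss hne))


lemma getD_getElem (l : List (List String)) (i : Nat) (h : i < l.length) :
    l.getD i [] = l[i] := List.getD_eq_getElem l [] h


lemma core0 (pixels : List (List String)) (C : Nat)
    (hlen : ∀ r ∈ pixels, r.length = C) :
    pixels =
      (List.range pixels.length).map (fun y => (List.range C).map (fun x =>
        (pixels.getD y []).getD x "")) := by
  apply List.ext_getElem
  · simp
  · intro i h1 h2
    have hi : i < pixels.length := by simpa using h1
    have hC : pixels[i].length = C := hlen _ (List.getElem_mem hi)
    simp only [List.getElem_map, List.getElem_range, getD_getElem pixels i hi]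

    apply List.ext_getElem
    · simp [hC]
    · intro j h3 h4
      have hj : j < C := by simpa [hC] using h3
      simp [List.getElem?_eq_getElem h3]

lemma core1 (pixels : List (List String)) (C : Nat) (hne : pixels ≠ [])
    (hmin : ∃ r ∈ pixels, r.length = C) (hge : ∀ r ∈ pixels, C ≤ r.length) :
    pyZip pixels.reverse =
      (List.range C).map (fun y => (List.range pixels.length).map (fun x =>
        (pixels.getD (pixels.length - 1 - x) []).getD y "")) := by
  rw [pyZip_eq C pixels.reverse (by simpa using hne)
    (by obtain ⟨r0, hr0, h0⟩ := hmin; exact ⟨r0, List.mem_reverse.mpr hr0, h0⟩)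
    (fun r hr => hge r (List.mem_reverse.mp hr))]
  apply List.ext_getElem
  · simp
  · intro i h1 h2
    have hiC : i < C := by simpa using h1
    simp only [List.getElem_map, List.getElem_range]
    apply List.ext_getElem
    · simp
    · intro j h3 h4
      have hj : j < pixels.length := by simpa using h3
      have hj' : pixels.length - 1 - j < pixels.length := by omega
      simp only [List.getElem_reverse, List.getElem_map, List.getElem_range]
      simp [List.getElem?_eq_getElem hj']

lemma core2 (pixels : List (List String)) (C : Nat)
    (hlen : ∀ r ∈ pixels, r.length = C) :
    (pixels.map (fun r => r.reverse)).reverse =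
      (List.range pixels.length).map (fun y => (List.range C).map (fun x =>
        (pixels.getD (pixels.length - 1 - y) []).getD (C - 1 - x) "")) := by
  apply List.ext_getElem
  · simp
  · intro i h1 h2
    have hi : i < pixels.length := by simpa using h1
    have hi' : pixels.length - 1 - i < pixels.length := by omega
    have hC : pixels[pixels.length - 1 - i].length = C := hlen _ (List.getElem_mem hi')
    simp only [List.getElem_reverse, List.getElem_map, List.getElem_range, List.length_map,
      getD_getElem pixels _ hi']
    apply List.ext_getElem
    · simp [hC]
    · intro j h3 h4
      have hj : j < C := by simp at h3; omega
      simp only [List.getElem_reverse, List.getElem_map, List.getElem_range]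
      simp [List.getElem?_eq_getElem (show C - 1 - j < pixels[pixels.length - 1 - i].length from by omega), hC]

lemma core3 (pixels : List (List String)) (C : Nat) (hne : pixels ≠ [])
    (hmin : ∃ r ∈ pixels, r.length = C) (hge : ∀ r ∈ pixels, C ≤ r.length) :
    (pyZip pixels).reverse =
      (List.range C).map (fun y => (List.range pixels.length).map (fun x =>
        (pixels.getD x []).getD (C - 1 - y) "")) := by
  rw [pyZip_eq C pixels hne hmin hge]
  apply List.ext_getElem
  · simp
  · intro i h1 h2
    have hiC : i < C := by simpa using h1
    simp only [List.getElem_reverse, List.getElem_map, List.getElem_range, List.length_map,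
      List.length_range]
    apply List.ext_getElem
    · simp
    · intro j h3 h4
      have hj : j < pixels.length := by simpa using h3
      simp [List.getElem?_eq_getElem hj]

-- ===== VERDICT (by name: the statement is the Claim_ definition above) =====
theorem rotate_flip_pixels_spec : Claim_equal_rotate_flip_pixels := by
  intro pixels o hdom hpre
  unfold Spec_rotate_flip_pixels
  obtain ⟨h0, h8, hne, hcond⟩ := hpre
  have hW : (if pixels.length = (pixels.head?.getD []).length then ((pixels.length : Nat) : Int)
      else (((pixels.head?.getD []).length : Nat) : Int)) =
      (((pixels.head?.getD []).length : Nat) : Int) := by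
    split_ifs with h
    · exact_mod_cast h
    · rfl
  have ho : o = 0 ∨ o = 1 ∨ o = 2 ∨ o = 3 ∨ o = 4 ∨ o = 5 ∨ o = 6 ∨ o = 7 := by omega
  rcases ho with rfl | rfl | rfl | rfl | rfl | rfl | rfl | rfl
  · -- orientation 0
    have hlen : ∀ r ∈ pixels, r.length = (pixels.head?.getD []).length := by
      norm_num at hcond
      exact hcond
    simp only [rotate_flip_pixels, rotate_flip_pixels_alt]
    rw [show PySem.List.pyGetD [(0:Int),1,2,3,0,3,2,1] 0 0 = 0 from by decide]
    norm_num [List.headD_eq_head?_getD]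
    simp only [hW]
    conv_rhs => rw [core0 pixels (pixels.head?.getD []).length hlen]
    simp only [PySem.List.pyRange_one, sub_zero, Int.toNat_natCast, List.map_map,
      Function.comp_def, zero_add]
    apply List.map_congr_left; intro y hy
    apply List.map_congr_left; intro x hx
    simp
  · -- orientation 1
    have hge : ∀ r ∈ pixels, (pixels.head?.getD []).length ≤ r.length := by
      norm_num at hcond
      exact hcond
    have hmin : ∃ r ∈ pixels, r.length = (pixels.head?.getD []).length :=
      ⟨pixels.head?.getD [], by simpa [List.headD_eq_head?_getD] using headD_mem pixels hne, rfl⟩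
    simp only [rotate_flip_pixels, rotate_flip_pixels_alt]
    rw [show PySem.List.pyGetD [(0:Int),1,2,3,0,3,2,1] 1 0 = 1 from by decide]
    norm_num [List.headD_eq_head?_getD]
    rw [core1 pixels (pixels.head?.getD []).length hne hmin hge]
    simp only [PySem.List.pyRange_one, sub_zero, Int.toNat_natCast, List.map_map,
      Function.comp_def, zero_add]
    apply List.map_congr_left; intro y hy
    apply List.map_congr_left; intro x hx
    have hx' : x < pixels.length := List.mem_range.mp hx
    rw [show (pixels.length : Int) - (x : Int) - 1 = ((pixels.length - 1 - x : Nat) : Int)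
      from by omega]
    simp
  · -- orientation 2
    have hlen : ∀ r ∈ pixels, r.length = (pixels.head?.getD []).length := by
      norm_num at hcond
      exact hcond
    simp only [rotate_flip_pixels, rotate_flip_pixels_alt]
    rw [show PySem.List.pyGetD [(0:Int),1,2,3,0,3,2,1] 2 0 = 2 from by decide]
    norm_num [List.headD_eq_head?_getD]
    simp only [hW]
    rw [core2 pixels (pixels.head?.getD []).length hlen]
    simp only [PySem.List.pyRange_one, sub_zero, Int.toNat_natCast, List.map_map,
      Function.comp_def, zero_add]
    apply List.map_congr_left; intro y hy
    apply List.map_congr_left; intro x hx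
    have hy' : y < pixels.length := List.mem_range.mp hy
    have hx' : x < (pixels.head?.getD []).length := List.mem_range.mp hx
    rw [show (pixels.length : Int) - (y : Int) - 1 = ((pixels.length - 1 - y : Nat) : Int)
      from by omega,
      show (((pixels.head?.getD []).length : Nat) : Int) - (x : Int) - 1 =
        (((pixels.head?.getD []).length - 1 - x : Nat) : Int) from by omega]
    simp
  · -- orientation 3
    have hge : ∀ r ∈ pixels, (pixels.head?.getD []).length ≤ r.length := by
      norm_num at hcond
      exact hcond
    have hmin : ∃ r ∈ pixels, r.length = (pixels.head?.getD []).length :=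
      ⟨pixels.head?.getD [], by simpa [List.headD_eq_head?_getD] using headD_mem pixels hne, rfl⟩
    simp only [rotate_flip_pixels, rotate_flip_pixels_alt]
    rw [show PySem.List.pyGetD [(0:Int),1,2,3,0,3,2,1] 3 0 = 3 from by decide]
    norm_num [List.headD_eq_head?_getD]
    rw [core3 pixels (pixels.head?.getD []).length hne hmin hge]
    simp only [PySem.List.pyRange_one, sub_zero, Int.toNat_natCast, List.map_map,
      Function.comp_def, zero_add]
    apply List.map_congr_left; intro y hy
    apply List.map_congr_left; intro x hx
    have hy' : y < (pixels.head?.getD []).length := List.mem_range.mp hy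
    rw [show (((pixels.head?.getD []).length : Nat) : Int) - (y : Int) - 1 =
      (((pixels.head?.getD []).length - 1 - y : Nat) : Int) from by omega]
    simp
  · -- orientation 4 (flip of 0; norm_num cancels the two reversals)
    have hlen : ∀ r ∈ pixels, r.length = (pixels.head?.getD []).length := by
      norm_num at hcond
      exact hcond
    simp only [rotate_flip_pixels, rotate_flip_pixels_alt]
    rw [show PySem.List.pyGetD [(0:Int),1,2,3,0,3,2,1] 4 0 = 0 from by decide]
    norm_num [List.headD_eq_head?_getD]
    simp only [hW]
    conv_rhs => rw [core0 pixels (pixels.head?.getD []).length hlen]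
    simp only [PySem.List.pyRange_one, sub_zero, Int.toNat_natCast, List.map_map,
      Function.comp_def, zero_add]
    apply List.map_congr_left; intro y hy
    apply List.map_congr_left; intro x hx
    simp
  · -- orientation 5 (flip of 3)
    have hge : ∀ r ∈ pixels, (pixels.head?.getD []).length ≤ r.length := by
      norm_num at hcond
      exact hcond
    have hmin : ∃ r ∈ pixels, r.length = (pixels.head?.getD []).length :=
      ⟨pixels.head?.getD [], by simpa [List.headD_eq_head?_getD] using headD_mem pixels hne, rfl⟩
    simp only [rotate_flip_pixels, rotate_flip_pixels_alt]
    rw [show PySem.List.pyGetD [(0:Int),1,2,3,0,3,2,1] 5 0 = 3 from by decide]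
    norm_num [List.headD_eq_head?_getD]
    rw [List.reverse_eq_iff, core3 pixels (pixels.head?.getD []).length hne hmin hge]
    simp only [PySem.List.pyRange_one, sub_zero, Int.toNat_natCast, List.map_map,
      Function.comp_def, zero_add]
    apply List.map_congr_left; intro y hy
    apply List.map_congr_left; intro x hx
    have hy' : y < (pixels.head?.getD []).length := List.mem_range.mp hy
    rw [show (((pixels.head?.getD []).length : Nat) : Int) - (y : Int) - 1 =
      (((pixels.head?.getD []).length - 1 - y : Nat) : Int) from by omega]
    simp
  · -- orientation 6 (flip of 2)
    have hlen : ∀ r ∈ pixels, r.length = (pixels.head?.getD []).length := by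
      norm_num at hcond
      exact hcond
    simp only [rotate_flip_pixels, rotate_flip_pixels_alt]
    rw [show PySem.List.pyGetD [(0:Int),1,2,3,0,3,2,1] 6 0 = 2 from by decide]
    norm_num [List.headD_eq_head?_getD]
    simp only [hW]
    rw [List.reverse_eq_iff, core2 pixels (pixels.head?.getD []).length hlen]
    simp only [PySem.List.pyRange_one, sub_zero, Int.toNat_natCast, List.map_map,
      Function.comp_def, zero_add]
    apply List.map_congr_left; intro y hy
    apply List.map_congr_left; intro x hx
    have hy' : y < pixels.length := List.mem_range.mp hy
    have hx' : x < (pixels.head?.getD []).length := List.mem_range.mp hx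
    rw [show (pixels.length : Int) - (y : Int) - 1 = ((pixels.length - 1 - y : Nat) : Int)
      from by omega,
      show (((pixels.head?.getD []).length : Nat) : Int) - (x : Int) - 1 =
        (((pixels.head?.getD []).length - 1 - x : Nat) : Int) from by omega]
    simp
  · -- orientation 7 (flip of 1; norm_num cancels the two reversals)
    have hge : ∀ r ∈ pixels, (pixels.head?.getD []).length ≤ r.length := by
      norm_num at hcond
      exact hcond
    have hmin : ∃ r ∈ pixels, r.length = (pixels.head?.getD []).length :=
      ⟨pixels.head?.getD [], by simpa [List.headD_eq_head?_getD] using headD_mem pixels hne, rfl⟩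
    simp only [rotate_flip_pixels, rotate_flip_pixels_alt]
    rw [show PySem.List.pyGetD [(0:Int),1,2,3,0,3,2,1] 7 0 = 1 from by decide]
    norm_num [List.headD_eq_head?_getD]
    rw [core1 pixels (pixels.head?.getD []).length hne hmin hge]
    simp only [PySem.List.pyRange_one, sub_zero, Int.toNat_natCast, List.map_map,
      Function.comp_def, zero_add]
    apply List.map_congr_left; intro y hy
    apply List.map_congr_left; intro x hx
    have hx' : x < pixels.length := List.mem_range.mp hx
    rw [show (pixels.length : Int) - (x : Int) - 1 = ((pixels.length - 1 - x : Nat) : Int)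
      from by omega]
    simp
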